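-- pv_equiv track=rewrite | github.com/EmilJunker/python-icat | icat/query.py | makesubst
-- ===== SOURCE A (Python) =====
-- substnames = {
--     "datafileFormat":"dff",
--     "dataset":"ds",
--     "dataset.investigation":"i",
--     "facility":"f",
--     "grouping":"g",
--     "instrumentScientists":"isc",
--     "investigation":"i",
--     "investigationGroups":"ig",
--     "investigationInstruments":"ii",
--     "investigationUsers":"iu",
--     "parameters":"p",
--     "parameters.type":"pt",
--     "type":"t",
--     "user":"u",
--     "userGroups":"ug",
-- }
--
-- def parents(obj):
--     """Iterate over the parents of obj as dot separated components.
--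
--     >>> list(parents("a.bb.c.ddd.e.ff"))
--     ['a', 'a.bb', 'a.bb.c', 'a.bb.c.ddd', 'a.bb.c.ddd.e']
--     >>> list(parents("abc"))
--     []
--     """
--     s = 0
--     while True:
--         i = obj.find('.', s)
--         if i < 0:
--             break
--         yield obj[:i]
--         s = i+1
--
-- def makesubst(objs):
--     subst = {}
--     substcount = 0
--     for obj in sorted(objs):
--         for o in parents(obj):
--             if o not in subst:
--                 if o in substnames and substnames[o] not in subst.values():
--                     subst[o] = substnames[o]
--                 else:
--                     substcount += 1
--                     subst[o] = "s%d" % substcount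
--     return subst
-- ===== SOURCE B (Python) =====
-- substnames = {
--     "datafileFormat":"dff",
--     "dataset":"ds",
--     "dataset.investigation":"i",
--     "facility":"f",
--     "grouping":"g",
--     "instrumentScientists":"isc",
--     "investigation":"i",
--     "investigationGroups":"ig",
--     "investigationInstruments":"ii",
--     "investigationUsers":"iu",
--     "parameters":"p",
--     "parameters.type":"pt",
--     "type":"t",
--     "user":"u",
--     "userGroups":"ug",
-- }
--
-- def _parents(obj):
--     """All dot-terminated prefixes of obj, by a single left-to-right char scan."""
--     res = []
--     cur = ""
--     for ch in obj:
--         if ch == '.':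
--             res.append(cur)
--         cur += ch
--     return res
--
-- def makesubst(objs):
--     # Pass 1: unique parent paths in first-occurrence order over sorted(objs).
--     order = []
--     seen = set()
--     for obj in sorted(objs):
--         for o in _parents(obj):
--             if o not in seen:
--                 seen.add(o)
--                 order.append(o)
--     # Pass 2: greedy alias assignment with an explicit set of used aliases.
--     subst = {}
--     used = set()
--     substcount = 0
--     for o in order:
--         name = substnames.get(o)
--         if name is None or name in used:
--             substcount += 1
--             name = "s%d" % substcount
--         subst[o] = name
--         used.add(name)
--     return subst
-- ===== Notes on version B (the rewrite author's own statement) =====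
-- stated objective: alternative
-- what changed: A discovers parent paths and assigns aliases in one interleaved loop, scanning subst.values() on each substnames hit and computing parents by repeated str.find; B is a two-pass decomposition: first collect the unique parent paths in first-occurrence order (seen-set + ordered list, parents by a single character scan), then greedily assign aliases while maintaining an explicit set of used aliases instead of rescanning the dict's values.
import Mathlib
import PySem

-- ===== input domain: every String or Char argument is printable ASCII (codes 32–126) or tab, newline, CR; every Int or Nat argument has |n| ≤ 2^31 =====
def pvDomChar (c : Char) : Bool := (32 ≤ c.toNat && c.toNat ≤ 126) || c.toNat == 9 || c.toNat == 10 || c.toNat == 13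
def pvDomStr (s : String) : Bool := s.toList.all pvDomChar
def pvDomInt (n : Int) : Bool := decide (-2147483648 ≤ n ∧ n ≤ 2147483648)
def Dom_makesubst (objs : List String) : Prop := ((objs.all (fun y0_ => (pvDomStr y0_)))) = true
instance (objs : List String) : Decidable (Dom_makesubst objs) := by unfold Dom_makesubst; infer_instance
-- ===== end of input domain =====

-- B replaces A's interleaved discover-and-assign loop (with its repeated subst.values() scan)
-- by two passes: collect the unique parent paths in first-occurrence order, then assign
-- aliases maintaining an explicit set of used aliases; objective: alternative decomposition.

-- ===== PORT A =====

-- the module-level substnames table, shared by both ports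
def substnamesD : PySem.Dict String String := PySem.Dict.ofList [
  ("datafileFormat", "dff"), ("dataset", "ds"), ("dataset.investigation", "i"),
  ("facility", "f"), ("grouping", "g"), ("instrumentScientists", "isc"),
  ("investigation", "i"), ("investigationGroups", "ig"),
  ("investigationInstruments", "ii"), ("investigationUsers", "iu"),
  ("parameters", "p"), ("parameters.type", "pt"), ("type", "t"),
  ("user", "u"), ("userGroups", "ug")]

-- A's `parents` generator: while loop `i = obj.find('.', s)`, yield obj[:i], s = i+1.
-- Fuel (length+1) only makes the while-loop total; obj[:i] with 0 ≤ i ≤ len is List.take.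
def parentsA_go (obj : List Char) (s : Nat) (fuel : Nat) : List String :=
  match fuel with
  | 0 => []
  | fuel + 1 =>
    let i := PySem.Chars.findFrom obj ['.'] (s : Int)
    if i < 0 then []
    else String.ofList (obj.take i.toNat) :: parentsA_go obj (i.toNat + 1) fuel

def parentsA (obj : String) : List String := parentsA_go obj.toList 0 (obj.toList.length + 1)

-- one iteration of A's inner loop body ("%d" of the positive counter is PySem.Int.toStr)
def stepA (st : PySem.Dict String String × Int) (o : String) :
    PySem.Dict String String × Int :=
  if st.1.contains o then st
  else
    match substnamesD.get? o with
    | some v =>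
        if v ∈ st.1.values then
          (st.1.insert o ("s" ++ PySem.Int.toStr (st.2 + 1)), st.2 + 1)
        else (st.1.insert o v, st.2)
    | none => (st.1.insert o ("s" ++ PySem.Int.toStr (st.2 + 1)), st.2 + 1)

def makesubst (objs : List String) : List (String × String) :=
  (((PySem.List.sorted objs (fun x => x) false).foldl
      (fun st obj => (parentsA obj).foldl stepA st)
      (PySem.Dict.empty, (0 : Int))).1).items

-- ===== PORT B =====

-- B's `_parents`: one left-to-right scan over the characters, appending the current
-- prefix whenever a '.' is met (cur kept as List Char; `cur += ch` is `++ [ch]`).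
def parentsB (obj : String) : List String :=
  (obj.toList.foldl
    (fun (p : List String × List Char) ch =>
      (if ch = '.' then p.1 ++ [String.ofList p.2] else p.1, p.2 ++ [ch]))
    ([], [])).1

-- B pass 1 loop body: seen-set + first-occurrence order list
def stepSeen (st : PySem.Set String × List String) (o : String) :
    PySem.Set String × List String :=
  if o ∈ st.1 then st else (st.1.add o, st.2 ++ [o])

-- B pass 2 loop body: greedy assignment with the set of used aliases
def stepB (st : PySem.Dict String String × PySem.Set String × Int) (o : String) :
    PySem.Dict String String × PySem.Set String × Int :=
  let nc : String × Int :=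
    match substnamesD.get? o with
    | some v =>
        if v ∈ st.2.1 then ("s" ++ PySem.Int.toStr (st.2.2 + 1), st.2.2 + 1)
        else (v, st.2.2)
    | none => ("s" ++ PySem.Int.toStr (st.2.2 + 1), st.2.2 + 1)
  (st.1.insert o nc.1, st.2.1.add nc.1, nc.2)

def makesubst_alt (objs : List String) : List (String × String) :=
  let order := ((PySem.List.sorted objs (fun x => x) false).foldl
      (fun st obj => (parentsB obj).foldl stepSeen st)
      (PySem.Set.ofList [], [])).2
  ((order.foldl stepB (PySem.Dict.empty, PySem.Set.ofList [], (0 : Int))).1).items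

-- ===== PRECONDITION & SPEC =====
def Spec_makesubst (objs : List String) (out : List (String × String)) : Prop := out = makesubst_alt objs
instance (objs : List String) (out : List (String × String)) : Decidable (Spec_makesubst objs out) := by unfold Spec_makesubst; infer_instance

-- ===== CLAIM (what is proved, stated in full; the proofs are below) =====
def Claim_equal_makesubst : Prop := ∀ (objs : List String), Dom_makesubst objs → Spec_makesubst objs (makesubst objs)

-- ===== LEMMAS AND PROOFS =====

-- common spec of both parents functions: dot-terminated prefixes
def dotPre (cur : List Char) : List Char → List String
  | [] => []
  | c :: t =>
      if c = '.' then String.ofList cur :: dotPre (cur ++ [c]) t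
      else dotPre (cur ++ [c]) t

theorem parentsB_foldl (t : List Char) : ∀ (res : List String) (cur : List Char),
    t.foldl (fun (p : List String × List Char) ch =>
      (if ch = '.' then p.1 ++ [String.ofList p.2] else p.1, p.2 ++ [ch])) (res, cur)
    = (res ++ dotPre cur t, cur ++ t) := by
  induction t with
  | nil => intro res cur; simp [dotPre]
  | cons c t ih =>
      intro res cur
      by_cases h : c = '.' <;> simp [List.foldl_cons, h, dotPre, ih]

theorem parentsB_eq_dotPre (obj : String) : parentsB obj = dotPre [] obj.toList := by
  simp [parentsB, parentsB_foldl]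

theorem singleton_infix_iff (c : Char) (t : List Char) : [c] <:+: t ↔ c ∈ t := by
  constructor
  · rintro ⟨a, b, rfl⟩; simp
  · intro h
    rcases List.append_of_mem h with ⟨a, b, rfl⟩
    exact ⟨a, b, by simp⟩

theorem dotPre_eq_nil (t : List Char) (h : '.' ∉ t) : ∀ cur, dotPre cur t = [] := by
  induction t with
  | nil => intro cur; rfl
  | cons c t ih =>
      intro cur
      simp only [List.mem_cons, not_or] at h
      have hne : c ≠ '.' := fun hc => h.1 hc.symm
      simp [dotPre, hne, ih h.2]

theorem dotPre_step (l : List Char) (n : Nat) : ∀ (s m : Nat), m - s = n → s ≤ m →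
    (hm : m < l.length) → l[m] = '.' →
    (∀ j (hj : j < l.length), s ≤ j → j < m → l[j] ≠ '.') →
    dotPre (l.take s) (l.drop s)
      = String.ofList (l.take m) :: dotPre (l.take (m + 1)) (l.drop (m + 1)) := by
  induction n with
  | zero =>
      intro s m hn hsm hm hdot _
      have hs : s = m := by omega
      subst hs
      rw [List.drop_eq_getElem_cons hm]
      simp only [dotPre, hdot]
      rw [List.take_add_one, List.getElem?_eq_getElem hm, hdot]
      rfl
  | succ n ih =>
      intro s m hn hsm hm hdot hmin
      have hs : s < m := by omega
      have hsl : s < l.length := by omega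
      rw [List.drop_eq_getElem_cons hsl]
      have hne : l[s] ≠ '.' := hmin s hsl le_rfl hs
      simp only [dotPre, if_neg hne]
      have htk : l.take s ++ [l[s]] = l.take (s + 1) := by
        rw [List.take_add_one, List.getElem?_eq_getElem hsl]; rfl
      rw [htk]
      exact ih (s + 1) m (by omega) (by omega) hm hdot
        (fun j hj h1 h2 => hmin j hj (by omega) h2)

theorem parentsA_go_eq (l : List Char) (fuel : Nat) : ∀ (s : Nat), s ≤ l.length →
    l.length + 1 - s ≤ fuel →
    parentsA_go l s fuel = dotPre (l.take s) (l.drop s) := by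
  induction fuel with
  | zero => intro s hs hf; omega
  | succ fuel ih =>
      intro s hs hf
      rw [parentsA_go]
      by_cases hneg : PySem.Chars.findFrom l ['.'] (s : Int) = -1
      · simp only [hneg]
        norm_num
        have hinf : ¬ (['.'] <:+: l.drop s) :=
          (PySem.Chars.findFrom_natCast_eq_neg_one_iff l ['.'] s hs).mp hneg
        rw [singleton_infix_iff] at hinf
        rw [dotPre_eq_nil _ hinf]
      · obtain ⟨hge, hpre, hmin⟩ := PySem.Chars.findFrom_natCast_spec l ['.'] s hs hneg
        set i := PySem.Chars.findFrom l ['.'] (s : Int) with hi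
        have hipos : (0 : Int) ≤ i := le_trans (by positivity) hge
        have hnot : ¬ i < 0 := by omega
        simp only [if_neg hnot]
        set m := i.toNat with hmdef
        have hsm : s ≤ m := by omega
        have hml : m < l.length := by
          rcases hpre with ⟨r, hr⟩
          have : (l.drop m).length ≥ 1 := by rw [← hr]; simp
          simp at this; omega
        have hdot : l[m] = '.' := by
          simpa using (hpre.getElem (i := 0) (by simp)).symm
        have hmin' : ∀ j (hj : j < l.length), s ≤ j → j < m → l[j] ≠ '.' := by
          intro j hj h1 h2 hc
          exact hmin j h1 h2 ⟨l.drop (j+1), by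
            simp [List.drop_eq_getElem_cons hj, hc]⟩
        rw [dotPre_step l (m - s) s m rfl hsm hml hdot hmin']
        congr 1
        exact ih (m + 1) (by omega) (by omega)

theorem parentsA_eq_parentsB (obj : String) : parentsA obj = parentsB obj := by
  rw [parentsB_eq_dotPre, parentsA]
  simpa using parentsA_go_eq obj.toList (obj.toList.length + 1) 0 (by omega) (by omega)

-- relative first-occurrence dedup (what both "o not in …" skips implement)
def dd (ks : List String) : List String → List String
  | [] => []
  | o :: t => if o ∈ ks then dd ks t else o :: dd (o :: ks) t

theorem dd_congr (l : List String) : ∀ ks₁ ks₂, (∀ x, x ∈ ks₁ ↔ x ∈ ks₂) →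
    dd ks₁ l = dd ks₂ l := by
  induction l with
  | nil => intros; rfl
  | cons o t ih =>
      intro ks₁ ks₂ h
      simp only [dd]
      by_cases ho : o ∈ ks₁
      · rw [if_pos ho, if_pos ((h o).mp ho)]; exact ih _ _ h
      · rw [if_neg ho, if_neg (fun hc => ho ((h o).mpr hc))]
        congr 1
        exact ih _ _ (fun x => by simp [h x])

theorem mem_dd (l : List String) : ∀ ks x, x ∈ dd ks l → x ∉ ks ∧ x ∈ l := by
  induction l with
  | nil => intro ks x h; cases h
  | cons o t ih =>
      intro ks x h
      simp only [dd] at h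
      by_cases ho : o ∈ ks
      · rw [if_pos ho] at h
        have := ih ks x h; exact ⟨this.1, List.mem_cons_of_mem _ this.2⟩
      · rw [if_neg ho] at h
        rcases List.mem_cons.mp h with rfl | h
        · exact ⟨ho, List.mem_cons_self⟩
        · have := ih (o :: ks) x h
          exact ⟨fun hc => this.1 (List.mem_cons_of_mem _ hc),
            List.mem_cons_of_mem _ this.2⟩

theorem nodup_dd (l : List String) : ∀ ks, (dd ks l).Nodup := by
  induction l with
  | nil => intro ks; exact List.nodup_nil
  | cons o t ih =>
      intro ks
      simp only [dd]
      by_cases ho : o ∈ ks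
      · rw [if_pos ho]; exact ih ks
      · rw [if_neg ho]
        refine List.nodup_cons.mpr ⟨fun hc => ?_, ih (o :: ks)⟩
        exact (mem_dd t (o :: ks) o hc).1 List.mem_cons_self

-- pass 1 of B computes dd over the seen set
theorem pass1_eq (l : List String) : ∀ (seen : PySem.Set String) (order : List String),
    l.foldl stepSeen (seen, order) = (seen ++ dd seen l, order ++ dd seen l) := by
  induction l with
  | nil => intro seen order; simp [dd]
  | cons o t ih =>
      intro seen order
      simp only [List.foldl_cons, stepSeen, dd]
      by_cases ho : o ∈ seen
      · rw [if_pos ho, if_pos ho, ih]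
      · rw [if_neg ho, if_neg ho]
        have hadd : seen.add o = seen ++ [o] := by
          simp [PySem.Set.add, ho]
        rw [hadd, ih]
        have hdd : dd (seen ++ [o]) t = dd (o :: seen) t :=
          dd_congr t _ _ (fun x => by simp [or_comm])
        rw [hdd]
        simp

theorem stepA_keys_fresh (st : PySem.Dict String String × Int) (o : String)
    (h : st.1.contains o = false) : (stepA st o).1.keys = st.1.keys ++ [o] := by
  unfold stepA
  rw [h]
  simp only [Bool.false_eq_true, if_false]
  cases hg : substnamesD.get? o with
  | none => exact PySem.Dict.keys_insert_of_not_contains _ _ h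
  | some v =>
      by_cases hv : v ∈ st.1.values <;>
        simp [hv, PySem.Dict.keys_insert_of_not_contains _ _ h]

-- A's skip turns the stream into its dd
theorem A_skip (l : List String) : ∀ (d : PySem.Dict String String) (c : Int),
    l.foldl stepA (d, c) = (dd d.keys l).foldl stepA (d, c) := by
  induction l with
  | nil => intro d c; rfl
  | cons o t ih =>
      intro d c
      simp only [List.foldl_cons, dd]
      by_cases ho : o ∈ d.keys
      · have hc : d.contains o = true := (PySem.Dict.contains_iff_mem_keys d o).mpr ho
        rw [if_pos ho]
        have hst : stepA (d, c) o = (d, c) := by unfold stepA; simp [hc]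
        rw [hst, ih]
      · have hc : d.contains o = false := by
          rcases Bool.eq_false_or_eq_true (d.contains o) with h | h
          · exact absurd ((PySem.Dict.contains_iff_mem_keys d o).mp h) ho
          · exact h
        rw [if_neg ho]
        simp only [List.foldl_cons]
        rcases hsa : stepA (d, c) o with ⟨d2, c2⟩
        have hkeys : d2.keys = d.keys ++ [o] := by
          have := stepA_keys_fresh (d, c) o hc
          rw [hsa] at this; exact this
        rw [ih d2 c2, hkeys]
        congr 1
        exact dd_congr t _ _ (fun x => by simp [or_comm])

theorem values_insert_fresh (d : PySem.Dict String String) (k v : String)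
    (h : d.contains k = false) : (d.insert k v).values = d.values ++ [v] := by
  simp [PySem.Dict.insert, h, PySem.Dict.values]

-- on a fresh nodup list, A's loop body and B's pass-2 body agree
theorem A_vs_B (l : List String) : ∀ (d : PySem.Dict String String)
    (used : PySem.Set String) (c : Int),
    (∀ v, v ∈ used ↔ v ∈ d.values) →
    l.Nodup → (∀ o ∈ l, o ∉ d.keys) →
    l.foldl stepA (d, c) = ((l.foldl stepB (d, used, c)).1, (l.foldl stepB (d, used, c)).2.2) := by
  induction l with
  | nil => intro d used c _ _ _; rfl
  | cons o t ih =>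
      intro d used c hu hnd hfresh
      have ho : o ∉ d.keys := hfresh o List.mem_cons_self
      have hc : d.contains o = false := by
        rcases Bool.eq_false_or_eq_true (d.contains o) with h | h
        · exact absurd ((PySem.Dict.contains_iff_mem_keys d o).mp h) ho
        · exact h
      have hkeys : ∀ w : String, (d.insert o w).keys = d.keys ++ [o] :=
        fun w => PySem.Dict.keys_insert_of_not_contains d w hc
      have hfresh' : ∀ w : String, ∀ o' ∈ t, o' ∉ (d.insert o w).keys := by
        intro w o' ho' hmem
        rw [hkeys w] at hmem
        rcases List.mem_append.mp hmem with h | h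
        · exact hfresh o' (List.mem_cons_of_mem _ ho') h
        · simp only [List.mem_singleton] at h
          exact (List.nodup_cons.mp hnd).1 (h ▸ ho')
      have hinv : ∀ w : String, ∀ v, v ∈ used.add w ↔ v ∈ (d.insert o w).values := by
        intro w v
        rw [PySem.Set.mem_add, values_insert_fresh d o w hc, List.mem_append,
          List.mem_singleton, hu v]
      simp only [List.foldl_cons, stepA, stepB, hc, Bool.false_eq_true, if_false]
      cases hg : substnamesD.get? o with
      | none =>
          simp only []
          exact ih (d.insert o ("s" ++ PySem.Int.toStr (c + 1))) (used.add _) (c + 1)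
            (hinv _) (List.nodup_cons.mp hnd).2 (hfresh' _)
      | some v =>
          simp only []
          by_cases hv : v ∈ d.values
          · rw [if_pos hv, if_pos ((hu v).mpr hv)]
            exact ih (d.insert o ("s" ++ PySem.Int.toStr (c + 1))) (used.add _) (c + 1)
              (hinv _) (List.nodup_cons.mp hnd).2 (hfresh' _)
          · rw [if_neg hv, if_neg (fun hcu => hv ((hu v).mp hcu))]
            exact ih (d.insert o v) (used.add v) c
              (hinv v) (List.nodup_cons.mp hnd).2 (hfresh' v)

theorem foldl_inner (f : String → List String) (g : α → String → α) (l : List String) :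
    ∀ (a : α), l.foldl (fun st obj => (f obj).foldl g st) a = (l.flatMap f).foldl g a := by
  induction l with
  | nil => intro a; rfl
  | cons o t ih => intro a; simp [List.flatMap_cons, List.foldl_append, ih]

-- ===== VERDICT (by name: the statement is the Claim_ definition above) =====
theorem makesubst_spec : Claim_equal_makesubst := by
  intro objs _
  unfold Spec_makesubst makesubst makesubst_alt
  simp only [parentsA_eq_parentsB]
  rw [foldl_inner parentsB stepA, foldl_inner parentsB stepSeen]
  set stream := (PySem.List.sorted objs (fun x => x) false).flatMap parentsB with hst
  rw [pass1_eq]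
  simp only []
  rw [A_skip]
  have hofl : (PySem.Set.ofList ([] : List String)) = ([] : List String) := rfl
  rw [hofl]
  simp only [PySem.Dict.keys_empty, List.nil_append]
  rw [A_vs_B (dd [] stream) PySem.Dict.empty [] 0
    (fun v => by constructor <;> intro h <;> simp_all [PySem.Dict.values, PySem.Dict.empty])
    (nodup_dd stream []) (fun o ho => by simp [PySem.Dict.keys_empty])]
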